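-- pv_equiv track=rewrite | github.com/hackingworm/challenges | 18M/getMaximumAmount.py | getMaximumAmount
-- ===== SOURCE A (Python) =====
-- import heapq
--
-- def getMaximumAmount(quantity: list[int], m: int) -> int:
--     for i in range(len(quantity)):
--         quantity[i] = -quantity[i]
--
--     heapq.heapify(quantity)
--
--     revenue = 0
--
--     for _ in range(m):
--         max_value = -heapq.heappop(quantity)
--         revenue += max_value
--         heapq.heappush(quantity, -(max_value - 1))
--
--     return revenue
-- ===== SOURCE B (Python) =====
-- def getMaximumAmount(quantity: list[int], m: int) -> int:
--     # Bucket counts per value; consume picks level by level from the max downward.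
--     # (Unlike A, this does not mutate `quantity`.)
--     if m <= 0:
--         return 0
--     cnt = {}
--     mx = quantity[0]
--     for q in quantity:
--         cnt[q] = cnt.get(q, 0) + 1
--         if q > mx:
--             mx = q
--     revenue = 0
--     remaining = m
--     v = mx
--     while remaining > 0:
--         c = cnt.pop(v, 0)
--         k = c if c < remaining else remaining
--         revenue += k * v
--         remaining -= k
--         cnt[v - 1] = cnt.get(v - 1, 0) + c
--         v -= 1
--     return revenue
-- ===== Notes on version B (the rewrite author's own statement) =====
-- stated objective: alternative
-- what changed: Replaces A's heap with m pop/push rounds by a value-indexed bucket counter consumed level by level from the maximum downward, batching all picks that happen at the same value into one arithmetic step (B also does not mutate the input list, unlike A).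
import Mathlib
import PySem

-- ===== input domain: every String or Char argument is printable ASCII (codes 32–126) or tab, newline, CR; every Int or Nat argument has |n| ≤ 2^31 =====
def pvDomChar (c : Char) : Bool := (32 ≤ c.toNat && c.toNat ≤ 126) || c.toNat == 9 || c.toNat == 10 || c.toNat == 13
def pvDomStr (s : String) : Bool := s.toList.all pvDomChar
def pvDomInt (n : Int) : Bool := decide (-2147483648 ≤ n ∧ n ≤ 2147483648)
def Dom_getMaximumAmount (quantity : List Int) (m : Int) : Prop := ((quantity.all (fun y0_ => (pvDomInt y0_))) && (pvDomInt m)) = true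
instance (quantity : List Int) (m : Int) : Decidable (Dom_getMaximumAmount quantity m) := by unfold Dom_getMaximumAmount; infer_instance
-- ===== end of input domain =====

-- B replaces A's m heap-pop/push rounds by a value-bucket counter consumed level by level (batching all picks at
-- each value); equivalence is about the RETURN value only: Python A mutates `quantity` in place, B does not.

-- ===== PORT A =====
-- Python A negates all entries, heapifies, then m times pops the min (= max of originals), adds it to revenue
-- and pushes back (value-1), negated. heapq's heap is ported as the multiset of its entries (a List Int):
-- heappop returns exactly the minimum value and removes one occurrence of it, heappush appends; the internal
-- array layout of the heap is unobservable in the returned revenue.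
def heapStep (st : Int × List Int) : Int × List Int :=
  match PySem.List.min? st.2 (fun x => x) with
  | none => st        -- heappop on an empty heap raises IndexError in Python: excluded by Pre_
  | some mn =>
      let max_value := -mn
      (st.1 + max_value, (-(max_value - 1)) :: (PySem.List.remove? st.2 mn).getD [])

def getMaximumAmount (quantity : List Int) (m : Int) : Int :=
  -- the negation loop; heapq.heapify reorders in place only: the multiset is unchanged
  (((List.range m.toNat).foldl (fun st _ => heapStep st) (0, quantity.map (fun x => -x)))).1

-- ===== PORT B =====
-- while remaining > 0: c = cnt.get(v,0); k = min(c, remaining); revenue += k*v; remaining -= k; pour c down to v-1.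
-- The while-loop is ported with fuel m.toNat: every iteration consumes at least one pick, so the fuel suffices.
def bLoop : Nat → PySem.Dict Int Int → Int → Int → Int → Int
  | 0, _, _, rev, _ => rev
  | fuel + 1, cnt, v, rev, remaining =>
      if remaining ≤ 0 then rev
      else
        let c := cnt.getD v 0            -- c = cnt.pop(v, 0): value …
        let cnt1 := cnt.erase v          -- … and removal of the consumed bucket
        let k := if c < remaining then c else remaining
        bLoop fuel (cnt1.insert (v - 1) (cnt1.getD (v - 1) 0 + c)) (v - 1) (rev + k * v) (remaining - k)

def getMaximumAmount_alt (quantity : List Int) (m : Int) : Int :=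
  if m ≤ 0 then 0
  else
    match quantity with
    | [] => 0          -- Python B raises IndexError here (quantity[0]); excluded by Pre_
    | q0 :: _ =>
        let p := quantity.foldl
          (fun (p : PySem.Dict Int Int × Int) q =>
            (p.1.insert q (p.1.getD q 0 + 1), if q > p.2 then q else p.2))
          (PySem.Dict.empty, q0)
        bLoop m.toNat p.1 p.2 0 m

-- ===== PRECONDITION & SPEC =====
-- Pre_ excludes exactly the inputs where Python A raises IndexError (heappop from the empty heap): an empty
-- quantity together with at least one requested pick. Python B raises there as well.
def Pre_getMaximumAmount (quantity : List Int) (m : Int) : Prop := quantity ≠ [] ∨ m ≤ 0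
instance (quantity : List Int) (m : Int) : Decidable (Pre_getMaximumAmount quantity m) := by
  unfold Pre_getMaximumAmount; infer_instance

def pvWitness_getMaximumAmount : List Int × Int := ([3, 2], 2)

def Spec_getMaximumAmount (quantity : List Int) (m : Int) (out : Int) : Prop := out = getMaximumAmount_alt quantity m
instance (quantity : List Int) (m : Int) (out : Int) : Decidable (Spec_getMaximumAmount quantity m out) := by unfold Spec_getMaximumAmount; infer_instance

-- ===== CLAIM (what is proved, stated in full; the proofs are below) =====
def Claim_equal_getMaximumAmount : Prop := ∀ (quantity : List Int) (m : Int), Dom_getMaximumAmount quantity m → Pre_getMaximumAmount quantity m → Spec_getMaximumAmount quantity m (getMaximumAmount quantity m)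

-- ===== LEMMAS AND PROOFS =====

-- Common specification: m rounds of "take a maximal element x, add it to revenue, put back x-1".
def greedy : Nat → List Int → Int
  | 0, _ => 0
  | n + 1, M =>
      match M.max? with
      | none => 0
      | some x => x + greedy n ((x - 1) :: M.erase x)

theorem greedy_nil (n : Nat) : greedy n [] = 0 := by
  cases n <;> simp [greedy]

theorem max?_perm {s t : List Int} (h : s.Perm t) : s.max? = t.max? := by
  cases hm : s.max? with
  | none =>
      rw [List.max?_eq_none_iff] at hm
      subst hm
      rw [Eq.comm, List.max?_eq_none_iff]
      exact h.symm.eq_nil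
  | some x =>
      rw [List.max?_eq_some_iff] at hm
      rw [Eq.comm, List.max?_eq_some_iff]
      exact ⟨h.mem_iff.mp hm.1, fun b hb => hm.2 b (h.mem_iff.mpr hb)⟩

theorem greedy_perm : ∀ (n : Nat) {s t : List Int}, s.Perm t → greedy n s = greedy n t := by
  intro n
  induction n with
  | zero => intro s t _; rfl
  | succ n ih =>
      intro s t h
      simp only [greedy]
      rw [max?_perm h]
      cases hm : t.max? with
      | none => rfl
      | some x =>
          show x + greedy n ((x - 1) :: s.erase x) = x + greedy n ((x - 1) :: t.erase x)
          rw [ih (List.Perm.cons (x - 1) (h.erase x))]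

theorem greedy_cons_max {M : List Int} {x : Int} (n : Nat) (hx : x ∈ M) (hb : ∀ y ∈ M, y ≤ x) :
    greedy (n + 1) M = x + greedy n ((x - 1) :: M.erase x) := by
  have hm : M.max? = some x := List.max?_eq_some_iff.mpr ⟨hx, hb⟩
  simp only [greedy]
  rw [hm]

theorem greedy_top : ∀ (n : Nat) (M : List Int) (v : Int), (∀ w ∈ M, w ≤ v) → n ≤ M.count v →
    greedy n M = n * v := by
  intro n
  induction n with
  | zero => intro M v _ _; simp [greedy]
  | succ n ih =>
      intro M v hb hc
      have hv : v ∈ M := List.count_pos_iff.mp (by omega)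
      rw [greedy_cons_max n hv hb]
      have hb' : ∀ w ∈ (v - 1) :: M.erase v, w ≤ v := by
        intro w hw
        rcases List.mem_cons.mp hw with h | h
        · omega
        · exact hb w (List.mem_of_mem_erase h)
      have hc' : n ≤ ((v - 1) :: M.erase v).count v := by
        rw [List.count_cons_of_ne (by omega), List.count_erase_self]
        omega
      rw [ih _ v hb' hc']
      push_cast
      ring

theorem erase_filter_ne (v : Int) : ∀ (M : List Int), (M.erase v).filter (fun w => w != v) = M.filter (fun w => w != v) := by
  intro M
  induction M with
  | nil => rfl
  | cons a M ih =>
      by_cases ha : a = v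
      · subst ha
        rw [List.erase_cons_head]
        simp
      · rw [List.erase_cons_tail (by simpa using ha)]
        simp only [List.filter_cons]
        rw [ih]

theorem greedy_pick_all : ∀ (c n : Nat) (M : List Int) (v : Int), (∀ w ∈ M, w ≤ v) →
    M.count v = c → c ≤ n →
    greedy n M = c * v + greedy (n - c) (List.replicate c (v - 1) ++ M.filter (fun w => w != v)) := by
  intro c
  induction c with
  | zero =>
      intro n M v _ hc _
      have hnot : v ∉ M := by
        intro h
        have := List.count_pos_iff.mpr h
        omega
      have : M.filter (fun w => w != v) = M :=
        List.filter_eq_self.mpr (fun a ha => by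
          by_cases h : a = v
          · exact absurd (h ▸ ha) hnot
          · simpa using h)
      simp [this]
  | succ c ih =>
      intro n M v hb hc hcn
      have hv : v ∈ M := List.count_pos_iff.mp (by omega)
      obtain ⟨n', rfl⟩ : ∃ n', n = n' + 1 := ⟨n - 1, by omega⟩
      rw [greedy_cons_max n' hv hb]
      set M₁ := (v - 1) :: M.erase v with hM₁
      have hb₁ : ∀ w ∈ M₁, w ≤ v := by
        intro w hw
        rcases List.mem_cons.mp hw with h | h
        · omega
        · exact hb w (List.mem_of_mem_erase h)
      have hc₁ : M₁.count v = c := by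
        rw [hM₁, List.count_cons_of_ne (by omega), List.count_erase_self]
        omega
      rw [ih n' M₁ v hb₁ hc₁ (by omega)]
      have hfil : M₁.filter (fun w => w != v) = (v - 1) :: M.filter (fun w => w != v) := by
        rw [hM₁, List.filter_cons]
        rw [if_pos (by simp)]
        rw [erase_filter_ne]
      rw [hfil]
      have hperm : (List.replicate c (v - 1) ++ (v - 1) :: M.filter (fun w => w != v)).Perm
          (List.replicate (c + 1) (v - 1) ++ M.filter (fun w => w != v)) := by
        have := List.perm_middle (a := v - 1) (l₁ := List.replicate c (v - 1))
          (l₂ := M.filter (fun w => w != v))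
        refine this.trans ?_
        have : (v - 1) :: (List.replicate c (v - 1) ++ M.filter (fun w => w != v)) =
            List.replicate (c + 1) (v - 1) ++ M.filter (fun w => w != v) := by
          simp [List.replicate_succ]
        rw [this]
      rw [greedy_perm _ hperm]
      have hsub : n' + 1 - (c + 1) = n' - c := by omega
      rw [hsub]
      push_cast
      ring

-- ===== A-side: the heap fold computes greedy =====

theorem heapStep_empty (r : Int) : heapStep (r, []) = (r, []) := by
  simp [heapStep, PySem.List.min?]

theorem heapStep_iter_empty : ∀ (n : Nat) (r : Int), (heapStep^[n] (r, [])).1 = r := by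
  intro n
  induction n with
  | zero => intro r; rfl
  | succ n ih =>
      intro r
      rw [Function.iterate_succ_apply, heapStep_empty]
      exact ih r

theorem A_iter : ∀ (n : Nat) (r : Int) (h M : List Int),
    h.Perm (M.map (fun x => -x)) → (heapStep^[n] (r, h)).1 = r + greedy n M := by
  intro n
  induction n with
  | zero => intro r h M _; simp [greedy]
  | succ n ih =>
      intro r h M hperm
      cases M with
      | nil =>
          rw [List.map_nil] at hperm
          have : h = [] := hperm.eq_nil
          subst this
          rw [greedy_nil, heapStep_iter_empty]
          ring
      | cons a M' =>
          set M := a :: M' with hM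
          have hne : h ≠ [] := by
            intro h0
            subst h0
            have := hperm.length_eq
            rw [hM] at this
            simp at this
          cases hmin : PySem.List.min? h (fun x => x) with
          | none => exact absurd ((PySem.List.min?_eq_none_iff h (fun x => x)).mp hmin) hne
          | some mn =>
              have hmem : mn ∈ h := PySem.List.min?_mem hmin
              have hlow : ∀ y ∈ h, mn ≤ y := by
                intro y hy
                exact PySem.List.min?_isMin hmin y hy
              set x := -mn with hx
              have hxM : x ∈ M := by
                have : mn ∈ M.map (fun x => -x) := hperm.mem_iff.mp hmem
                obtain ⟨u, hu, hux⟩ := List.mem_map.mp this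
                have : u = x := by omega
                exact this ▸ hu
              have hxb : ∀ w ∈ M, w ≤ x := by
                intro w hw
                have : -w ∈ h := hperm.mem_iff.mpr (List.mem_map.mpr ⟨w, hw, rfl⟩)
                have := hlow _ this
                omega
              have hstep : heapStep (r, h) = (r + x, (-(x - 1)) :: h.erase mn) := by
                simp only [heapStep, hmin]
                rw [PySem.List.remove?_eq_some_erase h mn hmem]
                rfl
              rw [Function.iterate_succ_apply, hstep]
              have hperm' : ((-(x - 1)) :: h.erase mn).Perm
                  (((x - 1) :: M.erase x).map (fun y => -y)) := by
                simp only [List.map_cons]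
                refine List.Perm.cons _ ?_
                have hinj : Function.Injective (fun y : Int => -y) := fun a b hab => by
                  simpa using hab
                have : (M.erase x).map (fun y => -y) = (M.map (fun y => -y)).erase (-x) :=
                  (List.map_erase hinj M).symm ▸ rfl
                rw [List.map_erase hinj]
                have : (-x) = mn := by omega
                rw [this]
                exact hperm.erase mn
              rw [ih (r + x) _ ((x - 1) :: M.erase x) hperm']
              rw [greedy_cons_max n hxM hxb]
              ring

theorem foldl_range_iterate {α : Type} (f : α → α) : ∀ (n : Nat) (s : α),
    (List.range n).foldl (fun st _ => f st) s = f^[n] s := by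
  intro n
  induction n with
  | zero => intro s; rfl
  | succ n ih =>
      intro s
      rw [List.range_succ, List.foldl_append, ih, List.foldl_cons, List.foldl_nil,
        Function.iterate_succ_apply']

theorem A_eq_greedy (quantity : List Int) (m : Int) :
    getMaximumAmount quantity m = greedy m.toNat quantity := by
  unfold getMaximumAmount
  rw [foldl_range_iterate heapStep]
  have := A_iter m.toNat 0 (quantity.map (fun x => -x)) quantity (List.Perm.refl _)
  rw [this]
  ring

-- ===== B-side: the bucket loop computes greedy =====

theorem find?_filter_ne (k k' : Int) (h : k' ≠ k) : ∀ (l : List (Int × Int)),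
    List.find? (fun p => p.1 == k') (List.filter (fun p => !(p.1 == k)) l)
      = List.find? (fun p => p.1 == k') l := by
  intro l
  induction l with
  | nil => rfl
  | cons p rest ih =>
      rw [List.filter_cons]
      by_cases hp : p.1 = k
      · rw [if_neg (by simp [hp])]
        rw [ih, List.find?_cons_of_neg (by simp [hp, Ne.symm h])]
      · rw [if_pos (by simp [hp])]
        by_cases hp' : p.1 = k'
        · rw [List.find?_cons_of_pos (by simp [hp']), List.find?_cons_of_pos (by simp [hp'])]
        · rw [List.find?_cons_of_neg (by simp [hp']), List.find?_cons_of_neg (by simp [hp']), ih]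

theorem getD_erase_of_ne (d : PySem.Dict Int Int) (k k' v : Int) (h : k' ≠ k) :
    (d.erase k).getD k' v = d.getD k' v := by
  obtain ⟨items⟩ := d
  simp only [PySem.Dict.erase, PySem.Dict.getD, PySem.Dict.get?]
  rw [find?_filter_ne k k' h]

theorem bLoop_nonpos (fuel : Nat) (cnt : PySem.Dict Int Int) (v rev remaining : Int)
    (h : remaining ≤ 0) : bLoop fuel cnt v rev remaining = rev := by
  cases fuel with
  | zero => rfl
  | succ fuel => simp [bLoop, h]

theorem bLoop_spec : ∀ (fuel : Nat) (cnt : PySem.Dict Int Int) (v rev remaining : Int)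
    (M : List Int), 0 < remaining → remaining.toNat ≤ fuel → (∀ w ∈ M, w ≤ v) → v ∈ M →
    (∀ w, w ≤ v → cnt.getD w 0 = (M.count w : Int)) →
    bLoop fuel cnt v rev remaining = rev + greedy remaining.toNat M := by
  intro fuel
  induction fuel with
  | zero => intro cnt v rev remaining M hr hf _ _ _; omega
  | succ fuel ih =>
      intro cnt v rev remaining M hr hf hb hv hcnt
      have hc : cnt.getD v 0 = (M.count v : Int) := hcnt v le_rfl
      have hcpos : 0 < M.count v := List.count_pos_iff.mpr hv
      simp only [bLoop]
      rw [if_neg (by omega)]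
      set c : Int := cnt.getD v 0 with hcdef
      set M' : List Int := List.replicate (M.count v) (v - 1) ++ M.filter (fun w => w != v)
        with hM'
      by_cases hck : c < remaining
      · rw [if_pos hck]
        -- invariants for the next iteration
        have hb' : ∀ w ∈ M', w ≤ v - 1 := by
          intro w hw
          rcases List.mem_append.mp hw with h | h
          · have := List.eq_of_mem_replicate h
            omega
          · have := List.mem_filter.mp h
            have h1 := hb w this.1
            have h2 : w ≠ v := by simpa using this.2
            omega
        have hv' : v - 1 ∈ M' := by
          apply List.mem_append.mpr
          left
          exact List.mem_replicate.mpr ⟨by omega, rfl⟩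
        have hcnt' : ∀ w, w ≤ v - 1 →
            ((cnt.erase v).insert (v - 1) ((cnt.erase v).getD (v - 1) 0 + c)).getD w 0
              = (M'.count w : Int) := by
          intro w hw
          rw [PySem.Dict.getD_insert]
          by_cases hwv : w = v - 1
          · rw [if_pos hwv, hM', List.count_append, List.count_replicate]
            rw [if_pos (by simp [hwv]), List.count_filter (by simp; omega)]
            rw [getD_erase_of_ne cnt v (v - 1) 0 (by omega)]
            rw [hcnt (v - 1) (by omega), hc]
            subst hwv
            push_cast
            ring
          · rw [if_neg hwv, hM', List.count_append, List.count_replicate,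
              if_neg (by simpa using fun h => hwv (by omega)),
              List.count_filter (by simp; omega)]
            rw [getD_erase_of_ne cnt v w 0 (by omega)]
            rw [hcnt w (by omega)]
            push_cast
            ring
        rw [ih _ (v - 1) (rev + c * v) (remaining - c) M' (by omega) (by omega) hb' hv' hcnt']
        have hgr := greedy_pick_all (M.count v) remaining.toNat M v hb rfl (by omega)
        rw [← hM'] at hgr
        have h1 : (remaining - c).toNat = remaining.toNat - M.count v := by omega
        rw [h1, hgr, hc]
        ring
      · rw [if_neg hck]
        rw [sub_self, bLoop_nonpos _ _ _ _ _ le_rfl]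
        have := greedy_top remaining.toNat M v hb (by omega)
        rw [this]
        have : (remaining.toNat : Int) = remaining := by omega
        rw [this]

theorem foldl_pair {α β γ : Type} (f : α → γ → α) (g : β → γ → β) :
    ∀ (l : List γ) (a : α) (b : β),
      (l.foldl (fun p x => (f p.1 x, g p.2 x)) (a, b)) = (l.foldl f a, l.foldl g b) := by
  intro l
  induction l with
  | nil => intro a b; rfl
  | cons x l ih => intro a b; exact ih (f a x) (g b x)

theorem foldl_max_spec : ∀ (l : List Int) (a : Int),
    (l.foldl (fun mx q => if q > mx then q else mx) a = a ∨
      l.foldl (fun mx q => if q > mx then q else mx) a ∈ l) ∧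
    a ≤ l.foldl (fun mx q => if q > mx then q else mx) a ∧
    (∀ w ∈ l, w ≤ l.foldl (fun mx q => if q > mx then q else mx) a) := by
  intro l
  induction l with
  | nil => intro a; simp
  | cons x l ih =>
      intro a
      simp only [List.foldl_cons]
      by_cases h : x > a
      · rw [if_pos h]
        obtain ⟨h1, h2, h3⟩ := ih x
        refine ⟨?_, by omega, ?_⟩
        · rcases h1 with h1 | h1
          · exact Or.inr (List.mem_cons.mpr (Or.inl h1))
          · exact Or.inr (List.mem_cons.mpr (Or.inr h1))
        · intro w hw
          rcases List.mem_cons.mp hw with rfl | hw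
          · omega
          · exact h3 w hw
      · rw [if_neg h]
        obtain ⟨h1, h2, h3⟩ := ih a
        refine ⟨?_, h2, ?_⟩
        · rcases h1 with h1 | h1
          · exact Or.inl h1
          · exact Or.inr (List.mem_cons.mpr (Or.inr h1))
        · intro w hw
          rcases List.mem_cons.mp hw with rfl | hw
          · omega
          · exact h3 w hw

theorem B_eq_greedy (quantity : List Int) (m : Int) (hq : quantity ≠ []) (hm : 0 < m) :
    getMaximumAmount_alt quantity m = greedy m.toNat quantity := by
  unfold getMaximumAmount_alt
  rw [if_neg (by omega)]
  cases quantity with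
  | nil => exact absurd rfl hq
  | cons q0 rest =>
      simp only
      rw [foldl_pair (fun (d : PySem.Dict Int Int) (q : Int) => d.insert q (d.getD q 0 + 1)) (fun mx q => if q > mx then q else mx)]
      have hcnt : ∀ w : Int, w ≤ (q0 :: rest).foldl (fun mx q => if q > mx then q else mx) q0 →
          ((q0 :: rest).foldl (fun d q => d.insert q (d.getD q 0 + 1)) PySem.Dict.empty).getD w 0
            = ((q0 :: rest).count w : Int) := by
        intro w _
        rw [PySem.Dict.getD_foldl_insert_add_one, PySem.Dict.getD_empty]
        ring
      obtain ⟨h1, h2, h3⟩ := foldl_max_spec (q0 :: rest) q0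
      have hvmem : (q0 :: rest).foldl (fun mx q => if q > mx then q else mx) q0 ∈ q0 :: rest := by
        rcases h1 with h1 | h1
        · rw [h1]; exact List.mem_cons_self
        · exact h1
      rw [bLoop_spec m.toNat _ _ 0 m (q0 :: rest) hm (by omega) h3 hvmem hcnt]
      ring

-- ===== VERDICT (by name: the statement is the Claim_ definition above) =====
theorem getMaximumAmount_spec : Claim_equal_getMaximumAmount := by
  intro quantity m _ hpre
  unfold Spec_getMaximumAmount
  by_cases hm : m ≤ 0
  · have hA : getMaximumAmount quantity m = 0 := by
      rw [A_eq_greedy]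
      have : m.toNat = 0 := by omega
      rw [this]
      rfl
    have hB : getMaximumAmount_alt quantity m = 0 := by
      unfold getMaximumAmount_alt
      rw [if_pos hm]
    rw [hA, hB]
  · rcases hpre with hq | hq
    · rw [A_eq_greedy, B_eq_greedy quantity m hq (by omega)]
    · omega
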